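-- pv_equiv track=rewrite | github.com/jonojr/AOC2019 | Day 4/day4.py | isExtensionOK
-- ===== SOURCE A (Python) =====
-- def isExtensionOK(number):
--     strNum = str(number)
--     previous = None
--     occurences = {}
--     for i in range(len(strNum)):
--         if previous and previous > strNum[i]:
--             return 0
--
--         if strNum[i] in occurences.keys():
--             occurences[strNum[i]] += 1
--         else:
--             occurences[strNum[i]] = 1
--
--         previous = strNum[i]
--
--     for key in occurences.keys():
--         item = occurences[key]
--         if item == 2:
--             return 1
--     return 0
-- ===== SOURCE B (Python) =====
-- from collections import Counter
--
--
-- def isExtensionOK(number):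
--     s = str(number)
--     return 1 if list(s) == sorted(s) and 2 in Counter(s).values() else 0
-- ===== Notes on version B (the rewrite author's own statement) =====
-- stated objective: idiomatic
-- what changed: Replaces the fused early-returning scan with a counting dict by two independent declarative checks: monotonicity via list(s) == sorted(s) and the exactly-two repeat via Counter(s).values(), combined in one expression.
import Mathlib
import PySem

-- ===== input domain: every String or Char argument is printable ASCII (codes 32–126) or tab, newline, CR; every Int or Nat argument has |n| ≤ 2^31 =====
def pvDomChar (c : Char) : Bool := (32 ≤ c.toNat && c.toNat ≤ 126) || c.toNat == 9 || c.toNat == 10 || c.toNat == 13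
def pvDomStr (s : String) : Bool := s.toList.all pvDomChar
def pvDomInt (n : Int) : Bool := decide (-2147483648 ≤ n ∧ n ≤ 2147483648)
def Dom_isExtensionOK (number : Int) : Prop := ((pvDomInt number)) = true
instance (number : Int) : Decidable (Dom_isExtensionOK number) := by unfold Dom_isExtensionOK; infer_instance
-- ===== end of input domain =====

-- B replaces A's fused early-returning scan-with-counting-dict by two independent
-- declarative checks (list equals its sorted copy; 2 among Counter values); objective: idiomatic.

-- ===== PORT A =====
-- the 'for i in range(len(strNum))' loop: state (previous, occurences); none = the early 'return 0'
def isExtensionOK_loop (previous : Option Char) (occ : PySem.Dict Char Int) :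
    List Char → Option (PySem.Dict Char Int)
  | [] => some occ
  | c :: rest =>
    if (match previous with | some p => decide (p > c) | none => false) = true then none
    else
      isExtensionOK_loop (some c)
        (if occ.contains c then occ.insert c (occ.getD c 0 + 1) else occ.insert c 1) rest

-- the 'for key in occurences.keys()' loop with the early 'return 1'
def isExtensionOK_check (occ : PySem.Dict Char Int) : List Char → Int
  | [] => 0
  | k :: rest => if occ.getD k 0 == 2 then 1 else isExtensionOK_check occ rest

def isExtensionOK (number : Int) : Int :=
  (isExtensionOK_loop none PySem.Dict.empty (PySem.Int.toStr number).toList).elim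
    0 (fun occ => isExtensionOK_check occ occ.keys)

-- ===== PORT B =====
def isExtensionOK_alt (number : Int) : Int :=
  let l := (PySem.Int.toStr number).toList
  if l = PySem.List.sorted l (fun x => x) false ∧ ((PySem.Dict.counter l).values.contains 2) = true
  then 1 else 0

-- ===== PRECONDITION & SPEC =====
def Spec_isExtensionOK (number : Int) (out : Int) : Prop := out = isExtensionOK_alt number
instance (number : Int) (out : Int) : Decidable (Spec_isExtensionOK number out) := by unfold Spec_isExtensionOK; infer_instance

-- ===== CLAIM (what is proved, stated in full; the proofs are below) =====
def Claim_equal_isExtensionOK : Prop := ∀ (number : Int), Dom_isExtensionOK number → Spec_isExtensionOK number (isExtensionOK number)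

-- ===== LEMMAS AND PROOFS =====

theorem getD_of_not_contains (d : PySem.Dict Char Int) (k : Char) (dflt : Int)
    (h : d.contains k = false) : d.getD k dflt = dflt := by
  have h2 : d.get? k = none := (PySem.Dict.get?_eq_none_iff_contains d k).mpr h
  simp [PySem.Dict.getD, h2]

theorem step_eq (occ : PySem.Dict Char Int) (c : Char) :
    (if occ.contains c then occ.insert c (occ.getD c 0 + 1) else occ.insert c 1) =
      occ.insert c (occ.getD c 0 + 1) := by
  by_cases h : occ.contains c = true
  · simp [h]
  · simp only [Bool.not_eq_true] at h
    simp [h, getD_of_not_contains occ c 0 h]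

theorem loop_some (l : List Char) : ∀ (p : Char) (occ : PySem.Dict Char Int),
    isExtensionOK_loop (some p) occ l =
      if List.IsChain (· ≤ ·) (p :: l)
      then some (l.foldl (fun d x => d.insert x (d.getD x 0 + 1)) occ)
      else none := by
  induction l with
  | nil => intro p occ; simp [isExtensionOK_loop]
  | cons c rest ih =>
    intro p occ
    by_cases hpc : p > c
    · have hnle : ¬ p ≤ c := not_le.mpr hpc
      simp [isExtensionOK_loop, hpc, List.isChain_cons_cons, hnle]
    · have hle : p ≤ c := not_lt.mp hpc
      simp only [isExtensionOK_loop, hpc, decide_false, if_neg (by simp : ¬ (false = true))]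
      rw [step_eq, ih]
      simp [List.isChain_cons_cons, hle, List.foldl_cons]

theorem loop_none (l : List Char) (occ : PySem.Dict Char Int) :
    isExtensionOK_loop none occ l =
      if List.IsChain (· ≤ ·) l
      then some (l.foldl (fun d x => d.insert x (d.getD x 0 + 1)) occ)
      else none := by
  cases l with
  | nil => simp [isExtensionOK_loop]
  | cons c rest =>
    simp only [isExtensionOK_loop, if_neg (by simp : ¬ (false = true))]
    rw [step_eq, loop_some]
    simp [List.foldl_cons]

theorem check_eq_any (occ : PySem.Dict Char Int) (ks : List Char) :
    isExtensionOK_check occ ks = if ks.any (fun k => occ.getD k 0 == 2) then 1 else 0 := by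
  induction ks with
  | nil => simp [isExtensionOK_check]
  | cons k rest ih =>
    by_cases h : (occ.getD k 0 == 2) = true <;> simp [isExtensionOK_check, h, ih]

theorem chain_iff_sorted (l : List Char) :
    List.IsChain (· ≤ ·) l ↔ l = PySem.List.sorted l (fun x => x) false := by
  constructor
  · intro h
    have hp : l.Pairwise (· ≤ ·) := List.isChain_iff_pairwise.mp h
    exact (PySem.List.sorted_eq_self_of_pairwise l (fun x => x) (by simpa using hp)).symm
  · intro h
    have hp := PySem.List.sorted_pairwise (xs := l) (key := fun x => x)
    rw [← h] at hp
    have hp' : l.Pairwise (· ≤ ·) := by simpa using hp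
    exact List.isChain_iff_pairwise.mpr hp'

-- ===== VERDICT (by name: the statement is the Claim_ definition above) =====
theorem isExtensionOK_spec : Claim_equal_isExtensionOK := by
  intro number _
  simp only [Spec_isExtensionOK, isExtensionOK, isExtensionOK_alt]
  set l := (PySem.Int.toStr number).toList with hl
  rw [loop_none]
  have hv : (PySem.Dict.counter l).values =
      (PySem.Dict.counter l).keys.map (fun k => (PySem.Dict.counter l).getD k 0) :=
    PySem.Dict.values_eq_map_keys _ (PySem.Dict.nodup_keys_counter l) 0
  have hcond : ((PySem.Dict.counter l).values.contains 2 = true) ↔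
      ((PySem.Dict.counter l).keys.any (fun k => (PySem.Dict.counter l).getD k 0 == 2) = true) := by
    rw [hv]; simp
  by_cases hc : List.IsChain (· ≤ ·) l
  · rw [if_pos hc]
    simp only [Option.elim]
    rw [PySem.Dict.foldl_insert_getD_add_one_eq_counter, check_eq_any]
    have hs : l = PySem.List.sorted l (fun x => x) false := (chain_iff_sorted l).1 hc
    by_cases h2 : (PySem.Dict.counter l).keys.any (fun k => (PySem.Dict.counter l).getD k 0 == 2) = true
    · rw [if_pos h2, if_pos ⟨hs, hcond.mpr h2⟩]
    · rw [if_neg h2, if_neg (fun hx => h2 (hcond.mp hx.2))]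
  · rw [if_neg hc]
    simp only [Option.elim]
    rw [if_neg (fun hx => hc ((chain_iff_sorted l).2 hx.1))]
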